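-- pv_equiv track=rewrite | github.com/asset101/QA-Automation_Python | Task_2.py | generate_valid_sequences
-- ===== SOURCE A (Python) =====
-- def is_valid_sequence(sequence: str) -> bool:
--     stack = []
--     matching_bracket = {')': '(', ']': '[', '}': '{'}
--
--     for char in sequence:
--         if char in matching_bracket.values():
--             stack.append(char)
--         elif char in matching_bracket.keys():
--             if not stack or matching_bracket[char] != stack.pop():
--                 return False
--     return not stack
--
-- def generate_valid_sequences(sequence: str):
--     def backtrack(s, start, lcount, rcount, lremove, rremove):
--         if lremove == 0 and rremove == 0:
--             if is_valid_sequence(s):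
--                 valid_sequences.add(s)
--             return
--
--         for i in range(start, len(s)):
--             if i != start and s[i] == s[i-1]:
--                 continue
--             if s[i] in '([' and lremove > 0:
--                 backtrack(s[:i] + s[i+1:], i, lcount-1, rcount, lremove-1, rremove)
--             elif s[i] in ')]' and rremove > 0:
--                 backtrack(s[:i] + s[i+1:], i, lcount, rcount-1, lremove, rremove-1)
--
--     lremove = rremove = 0
--     balance_round = balance_square = 0
--     for char in sequence:
--         if char == '(':
--             balance_round += 1
--         elif char == ')':
--             if balance_round > 0:
--                 balance_round -= 1
--             else:
--                 rremove += 1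
--         elif char == '[':
--             balance_square += 1
--         elif char == ']':
--             if balance_square > 0:
--                 balance_square -= 1
--             else:
--                 rremove += 1
--
--     lremove = balance_round + balance_square
--     valid_sequences = set()
--     backtrack(sequence, 0, balance_round, balance_square, lremove, rremove)
--
--     return valid_sequences
-- ===== SOURCE B (Python) =====
-- def is_valid_sequence(sequence: str) -> bool:
--     # push the EXPECTED closing bracket instead of the opener
--     expected = []
--     closer = {'(': ')', '[': ']', '{': '}'}
--     for ch in sequence:
--         if ch in closer:
--             expected.append(closer[ch])
--         elif ch in (')', ']', '}'):
--             if not expected or expected.pop() != ch: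
--                 return False
--     return not expected
--
--
-- def generate_valid_sequences(sequence: str):
--     lremove = rremove = 0
--     balance_round = balance_square = 0
--     for char in sequence:
--         if char == '(':
--             balance_round += 1
--         elif char == ')':
--             if balance_round > 0:
--                 balance_round -= 1
--             else:
--                 rremove += 1
--         elif char == '[':
--             balance_square += 1
--         elif char == ']':
--             if balance_square > 0:
--                 balance_square -= 1
--             else:
--                 rremove += 1
--     lremove = balance_round + balance_square
--
--     # iterative depth-first search with an explicit stack (no recursion,
--     # no dead lcount/rcount state); frame = (string, start, lremove, rremove)
--     valid_sequences = set()
--     stack = [(sequence, 0, lremove, rremove)]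
--     while stack:
--         s, start, lrem, rrem = stack.pop()
--         if lrem == 0 and rrem == 0:
--             if is_valid_sequence(s):
--                 valid_sequences.add(s)
--             continue
--         children = []
--         for i in range(start, len(s)):
--             if i != start and s[i] == s[i - 1]:
--                 continue
--             if s[i] in '([' and lrem > 0:
--                 children.append((s[:i] + s[i + 1:], i, lrem - 1, rrem))
--             elif s[i] in ')]' and rrem > 0:
--                 children.append((s[:i] + s[i + 1:], i, lrem, rrem - 1))
--         stack.extend(reversed(children))
--     return valid_sequences
-- ===== Notes on version B (the rewrite author's own statement) =====
-- stated objective: alternative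
-- what changed: The recursive backtrack closure (carrying dead lcount/rcount state) is replaced by an iterative depth-first search over an explicit work stack of frames with a materialised children list per frame, and the validity check pushes expected closing brackets instead of openers; the counting pass is kept.
import Mathlib
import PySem

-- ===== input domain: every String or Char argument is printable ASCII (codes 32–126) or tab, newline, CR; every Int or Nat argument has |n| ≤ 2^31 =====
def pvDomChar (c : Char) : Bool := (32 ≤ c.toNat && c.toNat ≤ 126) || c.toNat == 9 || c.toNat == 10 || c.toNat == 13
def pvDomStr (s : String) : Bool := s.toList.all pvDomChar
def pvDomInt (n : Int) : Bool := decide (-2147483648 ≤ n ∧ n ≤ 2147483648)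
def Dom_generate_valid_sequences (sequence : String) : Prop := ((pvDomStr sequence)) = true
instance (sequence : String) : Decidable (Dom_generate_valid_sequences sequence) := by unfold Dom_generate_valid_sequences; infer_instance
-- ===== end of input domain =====

-- B replaces A's recursive backtracking (with its dead lcount/rcount state) by an explicit
-- work-stack DFS over a materialised children list, and checks validity by pushing expected
-- closers instead of openers; same return value (objective: alternative).

-- ===== PORT A =====

-- matching_bracket lookup: matching_bracket[char], called only for char in ')]}' 
def pvMatching (c : Char) : Char :=
  if c = ')' then '(' else if c = ']' then '[' else '{'

-- is_valid_sequence: explicit stack of openers (stack modelled head-as-top; push/pop exact)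
def pvIsValidA (stack : List Char) : List Char → Bool
  | [] => stack.isEmpty
  | c :: rest =>
    if c = '(' ∨ c = '[' ∨ c = '{' then pvIsValidA (c :: stack) rest
    else if c = ')' ∨ c = ']' ∨ c = '}' then
      match stack with
      | [] => false
      | top :: s' => if pvMatching c ≠ top then false else pvIsValidA s' rest
    else pvIsValidA stack rest

-- the counting pass (identical in both Pythons): returns (balance_round, balance_square, rremove)
def pvCounts (s : List Char) : Nat × Nat × Nat :=
  s.foldl (fun st c =>
    if c = '(' then (st.1 + 1, st.2.1, st.2.2)
    else if c = ')' then (if st.1 > 0 then (st.1 - 1, st.2.1, st.2.2) else (st.1, st.2.1, st.2.2 + 1))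
    else if c = '[' then (st.1, st.2.1 + 1, st.2.2)
    else if c = ']' then (if st.2.1 > 0 then (st.1, st.2.1 - 1, st.2.2) else (st.1, st.2.1, st.2.2 + 1))
    else st) (0, 0, 0)

-- s[:i] + s[i+1:]; exact for 0 ≤ i < len(s), the only way it is called
def pvErase (s : List Char) (i : Nat) : List Char := s.take i ++ s.drop (i + 1)

-- backtrack: the nested recursive function of A; 'for i in range(start, len(s))' is the fold
-- over List.range' start (len - start); s[i] is s.getD i ' ' (exact: i < len throughout).
-- lcount/rcount are carried exactly as in A (where they are dead state). The fuel argument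
-- is a totalisation guard only: every call strictly decreases lrem + rrem, and the initial
-- fuel lrem + rrem + 1 is never exhausted.
def pvBacktrackA : Nat → List Char → Nat → Int → Int → Nat → Nat →
    PySem.Set (List Char) → PySem.Set (List Char)
  | 0, _, _, _, _, _, _, acc => acc
  | fuel + 1, s, start, lcount, rcount, lrem, rrem, acc =>
    if lrem = 0 ∧ rrem = 0 then
      (if pvIsValidA [] s then PySem.Set.add acc s else acc)
    else
      (List.range' start (s.length - start)).foldl (fun acc i =>
        if i ≠ start ∧ s.getD i ' ' = s.getD (i - 1) ' ' then acc
        else if (s.getD i ' ' = '(' ∨ s.getD i ' ' = '[') ∧ 0 < lrem then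
          pvBacktrackA fuel (pvErase s i) i (lcount - 1) rcount (lrem - 1) rrem acc
        else if (s.getD i ' ' = ')' ∨ s.getD i ' ' = ']') ∧ 0 < rrem then
          pvBacktrackA fuel (pvErase s i) i lcount (rcount - 1) lrem (rrem - 1) acc
        else acc) acc

def generate_valid_sequences (sequence : String) : List String :=
  let s := sequence.toList
  let c := pvCounts s
  (pvBacktrackA (c.1 + c.2.1 + c.2.2 + 1) s 0 (c.1 : Int) (c.2.1 : Int)
    (c.1 + c.2.1) c.2.2 PySem.Set.empty).map String.ofList

-- ===== PORT B =====

-- closer lookup of B's is_valid_sequence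
def pvCloser (c : Char) : Char :=
  if c = '(' then ')' else if c = '[' then ']' else '}'

-- B's is_valid_sequence: stack of EXPECTED closing brackets
def pvIsValidB (expected : List Char) : List Char → Bool
  | [] => expected.isEmpty
  | c :: rest =>
    if c = '(' ∨ c = '[' ∨ c = '{' then pvIsValidB (pvCloser c :: expected) rest
    else if c = ')' ∨ c = ']' ∨ c = '}' then
      match expected with
      | [] => false
      | top :: e' => if top ≠ c then false else pvIsValidB e' rest
    else pvIsValidB expected rest

-- B's inner for-loop: the children list of one frame
def pvChildren (s : List Char) (start lrem rrem : Nat) : List (List Char × Nat × Nat × Nat) :=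
  (List.range' start (s.length - start)).filterMap (fun i =>
    if i ≠ start ∧ s.getD i ' ' = s.getD (i - 1) ' ' then none
    else if (s.getD i ' ' = '(' ∨ s.getD i ' ' = '[') ∧ 0 < lrem then
      some (pvErase s i, i, lrem - 1, rrem)
    else if (s.getD i ' ' = ')' ∨ s.getD i ' ' = ']') ∧ 0 < rrem then
      some (pvErase s i, i, lrem, rrem - 1)
    else none)

-- B's while-loop: frames list head = top of stack; 'stack.extend(reversed(children))'
-- followed by pop-from-end is exactly 'children ++ rest' with pop-from-front. The fuel
-- argument is a totalisation guard only (one unit per pop; the initial fuel below is a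
-- bound on the number of pops, proved as pvNodes_le_pow).
def pvRunB : Nat → List (List Char × Nat × Nat × Nat) → PySem.Set (List Char) → PySem.Set (List Char)
  | 0, _, acc => acc
  | _ + 1, [], acc => acc
  | fuel + 1, (s, start, lrem, rrem) :: rest, acc =>
    if lrem = 0 ∧ rrem = 0 then
      pvRunB fuel rest (if pvIsValidB [] s then PySem.Set.add acc s else acc)
    else pvRunB fuel (pvChildren s start lrem rrem ++ rest) acc

def generate_valid_sequences_alt (sequence : String) : List String :=
  let s := sequence.toList
  let c := pvCounts s
  (pvRunB ((s.length + 1) ^ (c.1 + c.2.1 + c.2.2 + 1)) [(s, 0, c.1 + c.2.1, c.2.2)]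
    PySem.Set.empty).map String.ofList

-- ===== PRECONDITION & SPEC =====
def Spec_generate_valid_sequences (sequence : String) (out : List String) : Prop := out = generate_valid_sequences_alt sequence
instance (sequence : String) (out : List String) : Decidable (Spec_generate_valid_sequences sequence out) := by unfold Spec_generate_valid_sequences; infer_instance

-- ===== CLAIM (what is proved, stated in full; the proofs are below) =====
def Claim_equal_generate_valid_sequences : Prop := ∀ (sequence : String), Dom_generate_valid_sequences sequence → Spec_generate_valid_sequences sequence (generate_valid_sequences sequence)

-- ===== LEMMAS AND PROOFS =====

-- the two validity checkers agree when the B-stack is the closer-image of an opener A-stack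
theorem pv_valid_eq : ∀ (s stack : List Char),
    (∀ x ∈ stack, x = '(' ∨ x = '[' ∨ x = '{') →
    pvIsValidB (stack.map pvCloser) s = pvIsValidA stack s := by
  intro s
  induction s with
  | nil => intro stack _; simp [pvIsValidA, pvIsValidB]
  | cons c rest ih =>
    intro stack hstack
    rw [pvIsValidA.eq_def, pvIsValidB.eq_def]
    simp only []
    by_cases hc : c = '(' ∨ c = '[' ∨ c = '{'
    · rw [if_pos hc, if_pos hc]
      have : pvCloser c :: stack.map pvCloser = (c :: stack).map pvCloser := rfl
      rw [this]
      exact ih (c :: stack) (by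
        intro x hx
        rw [List.mem_cons] at hx
        rcases hx with rfl | hx
        · exact hc
        · exact hstack x hx)
    · rw [if_neg hc, if_neg hc]
      by_cases hc2 : c = ')' ∨ c = ']' ∨ c = '}'
      · rw [if_pos hc2, if_pos hc2]
        cases stack with
        | nil => simp
        | cons top s' =>
          have htop := hstack top (List.mem_cons_self)
          have hcond : pvCloser top = c ↔ pvMatching c = top := by
            rcases htop with rfl | rfl | rfl <;> rcases hc2 with rfl | rfl | rfl <;>
              simp [pvCloser, pvMatching]
          simp only [List.map_cons]
          by_cases he : pvCloser top = c
          · rw [if_neg (by simp only [ne_eq, not_not]; exact he),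
                if_neg (by simp only [ne_eq, not_not]; exact hcond.mp he)]
            exact ih s' (fun x hx => hstack x (List.mem_cons_of_mem _ hx))
          · rw [if_pos (by simpa using he),
                if_pos (by simpa using (fun hm => he (hcond.mpr hm)))]
      · rw [if_neg hc2, if_neg hc2]
        exact ih stack hstack

-- B's processing of one frame, lcount/rcount normalised to 0 and fuel to the sufficient bound
def pvStep (acc : PySem.Set (List Char)) (fr : List Char × Nat × Nat × Nat) :
    PySem.Set (List Char) :=
  pvBacktrackA (fr.2.2.1 + fr.2.2.2 + 1) fr.1 fr.2.1 0 0 fr.2.2.1 fr.2.2.2 acc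

-- shape of a child frame: one character shorter, lrem + rrem exactly one smaller
theorem pvChildren_shape (s : List Char) (st l r : Nat) :
    ∀ fr ∈ pvChildren s st l r, fr.1.length + 1 = s.length ∧ fr.2.2.1 + fr.2.2.2 + 1 = l + r := by
  intro fr hfr
  rw [pvChildren, List.mem_filterMap] at hfr
  obtain ⟨i, hi, hf⟩ := hfr
  rw [List.mem_range'_1] at hi
  have hilen : i < s.length := by omega
  have herase : (pvErase s i).length + 1 = s.length := by
    simp [pvErase]; omega
  by_cases h1 : i ≠ st ∧ s.getD i ' ' = s.getD (i - 1) ' '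
  · rw [if_pos h1] at hf
    exact absurd hf (by simp)
  · rw [if_neg h1] at hf
    by_cases h2 : (s.getD i ' ' = '(' ∨ s.getD i ' ' = '[') ∧ 0 < l
    · rw [if_pos h2] at hf
      obtain rfl := Option.some.inj hf
      refine ⟨herase, ?_⟩
      show l - 1 + r + 1 = l + r
      have := h2.2
      omega
    · rw [if_neg h2] at hf
      by_cases h3 : (s.getD i ' ' = ')' ∨ s.getD i ' ' = ']') ∧ 0 < r
      · rw [if_pos h3] at hf
        obtain rfl := Option.some.inj hf
        refine ⟨herase, ?_⟩
        show l + (r - 1) + 1 = l + r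
        have := h3.2
        omega
      · rw [if_neg h3] at hf
        exact absurd hf (by simp)

theorem pvChildren_budget (s : List Char) (st l r : Nat) :
    ∀ fr ∈ pvChildren s st l r, fr.2.2.1 + fr.2.2.2 < l + r := by
  intro fr hfr
  have := (pvChildren_shape s st l r fr hfr).2
  omega

theorem pvChildren_length_le (s : List Char) (st l r : Nat) :
    (pvChildren s st l r).length ≤ s.length := by
  calc (pvChildren s st l r).length ≤ (List.range' st (s.length - st)).length :=
        List.length_filterMap_le _ _
    _ ≤ s.length := by simp

-- pop count of B's loop on one frame
def pvNodes (s : List Char) (start lrem rrem : Nat) : Nat :=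
  if lrem = 0 ∧ rrem = 0 then 1
  else 1 + ((pvChildren s start lrem rrem).attach.map
      (fun fr => pvNodes fr.1.1 fr.1.2.1 fr.1.2.2.1 fr.1.2.2.2)).sum
  termination_by lrem + rrem
  decreasing_by
    exact pvChildren_budget s start lrem rrem fr.1 fr.2

def pvSumNodes (ch : List (List Char × Nat × Nat × Nat)) : Nat :=
  (ch.map (fun fr => pvNodes fr.1 fr.2.1 fr.2.2.1 fr.2.2.2)).sum

theorem pvRunB_nil (fuel : Nat) (acc : PySem.Set (List Char)) : pvRunB fuel [] acc = acc := by
  cases fuel <;> rfl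

theorem pvNodes_pos (s : List Char) (st l r : Nat) : 1 ≤ pvNodes s st l r := by
  rw [pvNodes]; split <;> omega

theorem pvNodes_step (s : List Char) (st l r : Nat) (h : ¬(l = 0 ∧ r = 0)) :
    pvNodes s st l r = 1 + pvSumNodes (pvChildren s st l r) := by
  rw [pvNodes, if_neg h, pvSumNodes]
  simp only [List.map_subtype, List.unattach_attach]

theorem pv_pow_succ_le (n k : Nat) : 1 ≤ k → n ^ k + 1 ≤ (n + 1) ^ k := by
  induction k with
  | zero => intro h; omega
  | succ k ih =>
    intro _
    rcases Nat.eq_zero_or_pos k with rfl | hk'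
    · simp
    · have h1 := ih hk'
      calc n ^ (k + 1) + 1 = n ^ k * n + 1 := by rw [Nat.pow_succ]
        _ ≤ n ^ k * n + (n ^ k + n) + 1 := Nat.add_le_add_right (Nat.le_add_right _ _) 1
        _ = (n ^ k + 1) * (n + 1) := by ring
        _ ≤ (n + 1) ^ k * (n + 1) := Nat.mul_le_mul_right _ h1
        _ = (n + 1) ^ (k + 1) := by rw [Nat.pow_succ]

-- the initial fuel of B's port bounds the pop count
theorem pvNodes_le_pow : ∀ (b : Nat) (s : List Char) (st l r : Nat), l + r = b →
    pvNodes s st l r ≤ (s.length + 1) ^ (l + r + 1) := by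
  intro b
  induction b using Nat.strong_induction_on with
  | _ b IH =>
    intro s st l r hb
    by_cases h0 : l = 0 ∧ r = 0
    · rw [pvNodes, if_pos h0]
      exact Nat.one_le_pow _ _ (by omega)
    · rw [pvNodes_step s st l r h0]
      have hlen1 : ∀ fr ∈ pvChildren s st l r,
          pvNodes fr.1 fr.2.1 fr.2.2.1 fr.2.2.2 ≤ s.length ^ (l + r) := by
        intro fr hfr
        obtain ⟨hlen, hbud⟩ := pvChildren_shape s st l r fr hfr
        have := IH (fr.2.2.1 + fr.2.2.2) (by omega) fr.1 fr.2.1 fr.2.2.1 fr.2.2.2 rfl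
        calc pvNodes fr.1 fr.2.1 fr.2.2.1 fr.2.2.2 ≤ (fr.1.length + 1) ^ (fr.2.2.1 + fr.2.2.2 + 1) := this
          _ = s.length ^ (l + r) := by rw [hlen, hbud]
      have hsum : pvSumNodes (pvChildren s st l r) ≤ s.length * s.length ^ (l + r) := by
        have h1 : pvSumNodes (pvChildren s st l r)
            ≤ (pvChildren s st l r).length * (s.length ^ (l + r)) := by
          rw [pvSumNodes]
          have := List.sum_le_card_nsmul
            ((pvChildren s st l r).map (fun fr => pvNodes fr.1 fr.2.1 fr.2.2.1 fr.2.2.2))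
            (s.length ^ (l + r))
            (by intro x hx; rw [List.mem_map] at hx; obtain ⟨fr, hfr, rfl⟩ := hx; exact hlen1 fr hfr)
          simpa [smul_eq_mul] using this
        calc pvSumNodes (pvChildren s st l r) ≤ (pvChildren s st l r).length * (s.length ^ (l + r)) := h1
          _ ≤ s.length * s.length ^ (l + r) :=
            Nat.mul_le_mul_right _ (pvChildren_length_le s st l r)
      calc 1 + pvSumNodes (pvChildren s st l r) ≤ 1 + s.length * s.length ^ (l + r) := by omega
        _ = s.length ^ (l + r + 1) + 1 := by rw [Nat.pow_succ]; ring
        _ ≤ (s.length + 1) ^ (l + r + 1) := pv_pow_succ_le _ _ (by omega)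

-- A's fold over one frame = fold of pvStep over B's children list, given that pvBacktrackA
-- ignores fuel (when sufficient) and lcount/rcount at every smaller budget
theorem pv_fold_eq (fA : Nat) (s : List Char) (start : Nat) (lc rc : Int) (l r : Nat)
    (Hind : ∀ (s' : List Char) (st' : Nat) (lc' rc' : Int) (l' r' : Nat) acc', l' + r' < l + r →
      pvBacktrackA fA s' st' lc' rc' l' r' acc' = pvStep acc' (s', st', l', r')) :
    ∀ (L : List Nat) (acc : PySem.Set (List Char)),
      L.foldl (fun acc i =>
        if i ≠ start ∧ s.getD i ' ' = s.getD (i - 1) ' ' then acc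
        else if (s.getD i ' ' = '(' ∨ s.getD i ' ' = '[') ∧ 0 < l then
          pvBacktrackA fA (pvErase s i) i (lc - 1) rc (l - 1) r acc
        else if (s.getD i ' ' = ')' ∨ s.getD i ' ' = ']') ∧ 0 < r then
          pvBacktrackA fA (pvErase s i) i lc (rc - 1) l (r - 1) acc
        else acc) acc
      = (L.filterMap (fun i =>
          if i ≠ start ∧ s.getD i ' ' = s.getD (i - 1) ' ' then none
          else if (s.getD i ' ' = '(' ∨ s.getD i ' ' = '[') ∧ 0 < l then
            some (pvErase s i, i, l - 1, r)
          else if (s.getD i ' ' = ')' ∨ s.getD i ' ' = ']') ∧ 0 < r then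
            some (pvErase s i, i, l, r - 1)
          else none)).foldl pvStep acc := by
  intro L
  induction L with
  | nil => intro acc; rfl
  | cons i L ihL =>
    intro acc
    rw [List.foldl_cons, List.filterMap_cons]
    split_ifs with h1 h2 h3
    · exact ihL acc
    · rw [List.foldl_cons, ihL, Hind _ _ _ _ _ _ acc (by omega)]
    · rw [List.foldl_cons, ihL, Hind _ _ _ _ _ _ acc (by omega)]
    · exact ihL acc

def pvMainP (b : Nat) : Prop :=
  ∀ (s : List Char) (st : Nat) (lc rc : Int) (l r : Nat), l + r = b →
  ∀ (fA : Nat), b < fA →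
  ∀ (fuel : Nat) (rest : List (List Char × Nat × Nat × Nat)) acc, pvNodes s st l r ≤ fuel →
    pvRunB fuel ((s, st, l, r) :: rest) acc
      = pvRunB (fuel - pvNodes s st l r) rest (pvBacktrackA fA s st lc rc l r acc)

theorem pv_main : ∀ b, pvMainP b := by
  intro b
  induction b using Nat.strong_induction_on with
  | _ b IH =>
    intro s st lc rc l r hb fA hfA fuel rest acc hfuel
    have hpos := pvNodes_pos s st l r
    obtain ⟨fuel', rfl⟩ : ∃ f', fuel = f' + 1 := ⟨fuel - 1, by omega⟩
    obtain ⟨fA', rfl⟩ : ∃ f', fA = f' + 1 := ⟨fA - 1, by omega⟩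
    by_cases h0 : l = 0 ∧ r = 0
    · obtain ⟨rfl, rfl⟩ := h0
      have hn : pvNodes s st 0 0 = 1 := by rw [pvNodes]; simp
      have hv : pvIsValidB [] s = pvIsValidA [] s := by
        simpa using pv_valid_eq s [] (by simp)
      rw [hn, pvRunB, pvBacktrackA]
      simp only [and_self, if_true, hv, Nat.add_sub_cancel]
    · have hn := pvNodes_step s st l r h0
      rw [pvRunB, if_neg h0]
      have hS : ∀ (ch : List (List Char × Nat × Nat × Nat)),
          (∀ fr ∈ ch, fr.2.2.1 + fr.2.2.2 < b) →
          ∀ (fuel₁ : Nat) rest₁ acc₁, pvSumNodes ch ≤ fuel₁ →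
          pvRunB fuel₁ (ch ++ rest₁) acc₁
            = pvRunB (fuel₁ - pvSumNodes ch) rest₁ (ch.foldl pvStep acc₁) := by
        intro ch
        induction ch with
        | nil => intro _ fuel₁ rest₁ acc₁ _; simp [pvSumNodes]
        | cons fr tail ihc =>
          intro hlt fuel₁ rest₁ acc₁ hf
          obtain ⟨s1, st1, l1, r1⟩ := fr
          have hfr := hlt (s1, st1, l1, r1) List.mem_cons_self
          have hsum : pvSumNodes ((s1, st1, l1, r1) :: tail)
              = pvNodes s1 st1 l1 r1 + pvSumNodes tail := by simp [pvSumNodes]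
          have h1 := IH (l1 + r1) hfr s1 st1 0 0 l1 r1 rfl (l1 + r1 + 1) (by omega)
            fuel₁ (tail ++ rest₁) acc₁ (by rw [hsum] at hf; omega)
          rw [List.cons_append, h1, ihc (fun x hx => hlt x (List.mem_cons_of_mem _ hx)) _ _ _
            (by rw [hsum] at hf; have := pvNodes_pos s1 st1 l1 r1; omega)]
          rw [hsum]
          have harith : fuel₁ - pvNodes s1 st1 l1 r1 - pvSumNodes tail
              = fuel₁ - (pvNodes s1 st1 l1 r1 + pvSumNodes tail) := by omega
          rw [harith]
          rfl
      have hHind : ∀ (s' : List Char) (st' : Nat) (lc' rc' : Int) (l' r' : Nat) acc', l' + r' < l + r →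
          pvBacktrackA fA' s' st' lc' rc' l' r' acc' = pvStep acc' (s', st', l', r') := by
        intro s' st' lc' rc' l' r' acc' hlt
        have e1 := IH (l' + r') (by omega) s' st' lc' rc' l' r' rfl fA' (by omega)
          (pvNodes s' st' l' r') [] acc' le_rfl
        have e2 := IH (l' + r') (by omega) s' st' 0 0 l' r' rfl (l' + r' + 1) (by omega)
          (pvNodes s' st' l' r') [] acc' le_rfl
        rw [Nat.sub_self, pvRunB_nil] at e1 e2
        exact e1.symm.trans e2
      rw [pvBacktrackA, if_neg h0, pv_fold_eq fA' s st lc rc l r hHind]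
      rw [show (List.range' st (s.length - st)).filterMap _ = pvChildren s st l r from rfl]
      rw [hS (pvChildren s st l r) (fun fr hfr => hb ▸ pvChildren_budget s st l r fr hfr)
        fuel' rest acc (by omega)]
      congr 1
      omega

-- ===== VERDICT (by name: the statement is the Claim_ definition above) =====
theorem generate_valid_sequences_spec : Claim_equal_generate_valid_sequences := by
  intro sequence _
  unfold Spec_generate_valid_sequences
  simp only [generate_valid_sequences, generate_valid_sequences_alt]
  have h := pv_main (((pvCounts sequence.toList).1 + (pvCounts sequence.toList).2.1) + (pvCounts sequence.toList).2.2)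
    sequence.toList 0 ((pvCounts sequence.toList).1 : Int) ((pvCounts sequence.toList).2.1 : Int)
    ((pvCounts sequence.toList).1 + (pvCounts sequence.toList).2.1) (pvCounts sequence.toList).2.2 rfl
    ((pvCounts sequence.toList).1 + (pvCounts sequence.toList).2.1 + (pvCounts sequence.toList).2.2 + 1) (by omega)
    ((sequence.toList.length + 1) ^ ((pvCounts sequence.toList).1 + (pvCounts sequence.toList).2.1 + (pvCounts sequence.toList).2.2 + 1))
    [] PySem.Set.empty
    (pvNodes_le_pow _ sequence.toList 0 _ _ rfl)
  rw [pvRunB_nil] at h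
  rw [h]
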